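-- pv_equiv track=rewrite | github.com/StephanPythonGod/Demotool-Qodia | utils/utils.py | clean_zitat
-- ===== SOURCE A (Python) =====
-- def clean_zitat(zitat):
--     lines = zitat.split("\n")
--     cleaned_lines = []
--     for line in lines:
--         parts = line.split("[...]")
--         for part in parts:
--             cleaned_part = part.strip()
--             if cleaned_part:
--                 cleaned_lines.append(cleaned_part)
--     return cleaned_lines
-- ===== SOURCE B (Python) =====
-- def clean_zitat(zitat):
--     # Single left-to-right scan (state machine): no split(), no strip().
--     # `cur` holds the current fragment stripped on the fly; `pend` buffers a
--     # run of interior whitespace that is only committed when a further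
--     # non-space character arrives, so trailing whitespace is never emitted.
--     out = []
--     cur = []
--     pend = []
--     i = 0
--     n = len(zitat)
--     while i < n:
--         c = zitat[i]
--         if c == "\n" or zitat.startswith("[...]", i):
--             if cur:
--                 out.append("".join(cur))
--             cur = []
--             pend = []
--             i += 1 if c == "\n" else 5
--         elif c.isspace():
--             if cur:
--                 pend.append(c)
--             i += 1
--         else:
--             cur += pend
--             cur.append(c)
--             pend = []
--             i += 1
--     if cur:
--         out.append("".join(cur))
--     return out
-- ===== Notes on version B (the rewrite author's own statement) =====
-- stated objective: alternative
-- what changed: Replaced the nested newline-split / marker-split / strip passes by one left-to-right character scan: a state machine with a current-fragment buffer and a pending-whitespace buffer that strips on the fly and never calls split or strip.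
import Mathlib
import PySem

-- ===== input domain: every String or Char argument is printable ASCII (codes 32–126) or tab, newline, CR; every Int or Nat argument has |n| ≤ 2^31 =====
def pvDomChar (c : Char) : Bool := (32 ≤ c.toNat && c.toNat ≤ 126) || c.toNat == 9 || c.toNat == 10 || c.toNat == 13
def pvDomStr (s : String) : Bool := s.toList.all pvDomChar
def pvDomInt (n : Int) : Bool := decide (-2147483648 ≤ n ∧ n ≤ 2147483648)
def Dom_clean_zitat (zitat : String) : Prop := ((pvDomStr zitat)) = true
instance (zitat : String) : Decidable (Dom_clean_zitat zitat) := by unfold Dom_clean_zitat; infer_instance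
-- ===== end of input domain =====

-- B replaces A's nested newline-split / marker-split / strip passes by one left-to-right character
-- scan with a current-fragment buffer and a pending-whitespace buffer (objective: alternative;
-- return value proved equal).

-- ===== PORT A =====
def clean_zitat (zitat : String) : List String :=
  let lines := (PySem.Chars.splitOn zitat.toList ['\n']).map String.ofList
  lines.foldl (fun cleaned_lines line =>
    let parts := (PySem.Chars.splitOn line.toList ['[', '.', '.', '.', ']']).map String.ofList
    parts.foldl (fun acc part =>
      let cleaned_part := PySem.Str.strip part
      if cleaned_part ≠ "" then acc ++ [cleaned_part] else acc) cleaned_lines) []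

-- ===== PORT B =====
-- Hand port of Source B's while loop over positions i: the index loop becomes structural recursion on
-- the remaining characters; `cur` is the current fragment (already stripped on the fly), `pend`
-- the buffered run of interior whitespace, `out` the accumulated result — exact, step for step.
def scanB : List Char → List Char → List Char → List String → List String
  | [], cur, _pend, out => out ++ (if cur ≠ [] then [String.ofList cur] else [])
  | c :: rest, cur, pend, out =>
    if c = '\n' ∨ ['[', '.', '.', '.', ']'].isPrefixOf (c :: rest) then
      scanB (if c = '\n' then rest else rest.drop 4) [] []
        (out ++ (if cur ≠ [] then [String.ofList cur] else []))
    else if PySem.Chars.isspace c then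
      scanB rest cur (if cur ≠ [] then pend ++ [c] else pend) out
    else
      scanB rest (cur ++ (pend ++ [c])) [] out
termination_by l _ _ _ => l.length
decreasing_by
  · split <;> simp
  · simp
  · simp

def clean_zitat_alt (zitat : String) : List String :=
  scanB zitat.toList [] [] []

-- ===== PRECONDITION & SPEC =====
def Spec_clean_zitat (zitat : String) (out : List String) : Prop := out = clean_zitat_alt zitat
instance (zitat : String) (out : List String) : Decidable (Spec_clean_zitat zitat out) := by unfold Spec_clean_zitat; infer_instance

-- ===== CLAIM (what is proved, stated in full; the proofs are below) =====
def Claim_equal_clean_zitat : Prop := ∀ (zitat : String), Dom_clean_zitat zitat → Spec_clean_zitat zitat (clean_zitat zitat)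

-- ===== LEMMAS AND PROOFS =====

-- the fixed "[...]" separator
def sep5 : List Char := ['[', '.', '.', '.', ']']

-- Clean structural recursion equivalent to PySem.Chars.splitOn (for nonempty sep).
def splitRec (sep : List Char) : List Char → List (List Char)
  | [] => [[]]
  | c :: rest =>
    if sep.isPrefixOf (c :: rest) ∧ sep ≠ [] then
      [] :: splitRec sep ((c :: rest).drop sep.length)
    else
      match splitRec sep rest with
      | [] => [[c]]
      | p :: ps => (c :: p) :: ps
termination_by l => l.length
decreasing_by
  · rename_i h
    cases sep with
    | nil => exact absurd rfl h.2
    | cons a s => simp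
  · simp

-- tokenization on which both sides meet: cut at '\n' or at a leftmost "[...]"
def tok : List Char → List (List Char)
  | [] => [[]]
  | c :: rest =>
    if c = '\n' ∨ sep5.isPrefixOf (c :: rest) then
      [] :: tok (if c = '\n' then rest else rest.drop 4)
    else
      match tok rest with
      | [] => [[c]]
      | p :: ps => (c :: p) :: ps
termination_by l => l.length
decreasing_by
  · split <;> simp
  · simp

def stripFilter (ts : List (List Char)) : List String :=
  (ts.map (fun l => PySem.Str.strip (String.ofList l))).filter (fun s => s ≠ "")

-- scanner invariant: pend is all whitespace, only nonempty under a nonempty cur,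
-- and cur neither starts nor ends with whitespace
def InvCP (cur pend : List Char) : Prop :=
  (∀ x ∈ pend, PySem.Chars.isspace x = true) ∧
  (cur = [] → pend = []) ∧
  (∀ a ∈ cur.head?, PySem.Chars.isspace a = false) ∧
  (∀ a ∈ cur.getLast?, PySem.Chars.isspace a = false)

theorem modifyHead_idfun {α : Type} (l : List α) : List.modifyHead (fun x => x) l = l := by
  cases l <;> simp

theorem splitRec_ne_nil (sep l : List Char) : splitRec sep l ≠ [] := by
  cases l with
  | nil => simp [splitRec]
  | cons c rest =>
    rw [splitRec]
    split
    · simp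
    · cases h : splitRec sep rest <;> simp

theorem tok_ne_nil (l : List Char) : tok l ≠ [] := by
  cases l with
  | nil => simp [tok]
  | cons c rest =>
    rw [tok]
    split
    · simp
    · cases h : tok rest <;> simp

theorem splitOn_go_eq (sep : List Char) (hsep : sep ≠ []) :
    ∀ fuel l cur acc, l.length ≤ fuel →
      PySem.Chars.splitOn.go sep fuel l cur acc
        = acc.reverse ++ (splitRec sep l).modifyHead (cur.reverse ++ ·) := by
  intro fuel
  induction fuel with
  | zero =>
    intro l cur acc hl
    have : l = [] := List.eq_nil_of_length_eq_zero (Nat.le_zero.mp hl)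
    subst this
    simp [PySem.Chars.splitOn.go, splitRec]
  | succ n ih =>
    intro l cur acc hl
    cases l with
    | nil => simp [PySem.Chars.splitOn.go, splitRec]
    | cons c rest =>
      rw [PySem.Chars.splitOn.go]
      by_cases hp : sep.isPrefixOf (c :: rest) = true
      · rw [if_pos hp]
        rw [ih _ [] (cur.reverse :: acc) (by
          simp at hl ⊢
          cases sep with
          | nil => exact absurd rfl hsep
          | cons a s => simp; omega)]
        rw [splitRec, if_pos ⟨hp, hsep⟩]
        simp [modifyHead_idfun]
      · rw [if_neg hp]
        rw [ih rest (c :: cur) acc (by simp at hl ⊢; omega)]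
        rw [splitRec, if_neg (by tauto)]
        rcases h : splitRec sep rest with _ | ⟨p, ps⟩
        · exact absurd h (splitRec_ne_nil sep rest)
        · simp

theorem splitOn_eq_splitRec (sep l : List Char) (hsep : sep ≠ []) :
    PySem.Chars.splitOn l sep = splitRec sep l := by
  unfold PySem.Chars.splitOn
  rw [splitOn_go_eq sep hsep _ l [] [] (by omega)]
  simp [modifyHead_idfun]

theorem splitRec_newline (l : List Char) :
    splitRec ['\n'] l = List.splitOnP (· = '\n') l := by
  induction l with
  | nil => simp [splitRec]
  | cons c rest ih =>
    rw [splitRec, List.splitOnP_cons]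
    by_cases hc : c = '\n'
    · subst hc
      rw [if_pos (by simp [List.isPrefixOf]), if_pos (by simp)]
      simp [ih]
    · rw [if_neg (by simp [List.isPrefixOf]; tauto), if_neg (by simp [hc])]
      rw [ih]
      rcases h : List.splitOnP (· = '\n') rest with _ | ⟨p, ps⟩
      · exact absurd h (List.splitOnP_ne_nil _ rest)
      · simp [List.modifyHead]

theorem splitRec_sep_prefix (sep q : List Char) (hsep : sep ≠ []) :
    splitRec sep (sep ++ q) = [] :: splitRec sep q := by
  cases sep with
  | nil => exact absurd rfl hsep
  | cons a s =>
    rw [List.cons_append, splitRec,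
      if_pos ⟨List.isPrefixOf_iff_prefix.mpr ⟨q, by simp⟩, hsep⟩]
    simp

theorem splitOnP_no_sat_append (P : Char → Bool) (xs ys : List Char)
    (h : ∀ c ∈ xs, P c = false) :
    List.splitOnP P (xs ++ ys) = (List.splitOnP P ys).modifyHead (xs ++ ·) := by
  induction xs with
  | nil => simp [modifyHead_idfun]
  | cons a xs ih =>
    rw [List.cons_append, List.splitOnP_cons, if_neg (by simp [h a (by simp)])]
    rw [ih (fun c hc => h c (by simp [hc]))]
    rcases hy : List.splitOnP P ys with _ | ⟨p, ps⟩
    · exact absurd hy (List.splitOnP_ne_nil _ ys)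
    · simp

theorem splitOnP_headI_prefix (P : Char → Bool) (l : List Char) :
    ∃ q qs, List.splitOnP P l = q :: qs ∧ q <+: l := by
  induction l with
  | nil => exact ⟨[], [], by simp, by simp⟩
  | cons c rest ih =>
    rw [List.splitOnP_cons]
    by_cases hc : P c = true
    · exact ⟨[], _, by rw [if_pos hc], by simp⟩
    · obtain ⟨q, qs, hq, hpre⟩ := ih
      refine ⟨c :: q, qs, ?_, by simpa using hpre⟩
      rw [if_neg hc, hq]; rfl

theorem flatMap_splitOnP_sep5_drop (l : List Char) (h : sep5 <+: l) :
    (List.splitOnP (· = '\n') l).flatMap (splitRec sep5)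
      = [] :: (List.splitOnP (· = '\n') (l.drop 5)).flatMap (splitRec sep5) := by
  obtain ⟨t, rfl⟩ := h
  rw [splitOnP_no_sat_append _ sep5 t (by
    intro c hc
    simp [sep5] at hc
    rcases hc with rfl | rfl | rfl | rfl | rfl <;> rfl)]
  rcases ht : List.splitOnP (· = '\n') t with _ | ⟨q, qs⟩
  · exact absurd ht (List.splitOnP_ne_nil _ t)
  · have hdrop : (sep5 ++ t).drop 5 = t := by simp [sep5]
    rw [hdrop, ht]
    simp only [List.modifyHead, List.flatMap_cons]
    rw [splitRec_sep_prefix sep5 q (by simp [sep5])]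
    simp

theorem tok_eq (cs : List Char) :
    tok cs = (List.splitOnP (· = '\n') cs).flatMap (splitRec sep5) := by
  induction cs using tok.induct with
  | case1 => simp [tok, splitRec]
  | case2 c rest hcond ih =>
    simp only [dite_eq_ite] at ih
    rw [tok, if_pos hcond]
    by_cases hc : c = '\n'
    · subst hc
      rw [if_pos rfl] at ih ⊢
      rw [List.splitOnP_cons, if_pos (by simp)]
      simp [ih, splitRec]
    · have hp : sep5.isPrefixOf (c :: rest) := by tauto
      rw [if_neg hc] at ih ⊢
      rw [flatMap_splitOnP_sep5_drop (c :: rest)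
        (by rw [List.isPrefixOf_iff_prefix] at hp; exact hp)]
      have h5 : (c :: rest).drop 5 = rest.drop 4 := by simp
      rw [h5, ih]
  | case3 c rest hcond hnil ih =>
    exact absurd hnil (tok_ne_nil rest)
  | case4 c rest hcond p ps hps ih =>
    have hc : ¬ c = '\n' := fun h => hcond (Or.inl h)
    have hp : ¬ sep5.isPrefixOf (c :: rest) = true := fun h => hcond (Or.inr h)
    rw [tok, if_neg hcond, hps]
    rw [List.splitOnP_cons, if_neg (by simpa using hc)]
    obtain ⟨q, qs, hq, hqpre⟩ := splitOnP_headI_prefix (· = '\n') rest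
    rw [hq, hps] at ih
    rw [hq]
    rcases hq' : splitRec sep5 q with _ | ⟨p', ps'⟩
    · exact absurd hq' (splitRec_ne_nil sep5 q)
    · have hq5 : ¬ (sep5.isPrefixOf (c :: q) = true ∧ sep5 ≠ []) := by
        rintro ⟨habs, -⟩
        apply hp
        rw [List.isPrefixOf_iff_prefix] at habs ⊢
        exact habs.trans (by simpa using hqpre)
      have hcq : splitRec sep5 (c :: q) = (c :: p') :: ps' := by
        rw [splitRec, if_neg hq5, hq']
      rw [List.flatMap_cons, hq'] at ih
      simp only [List.modifyHead, List.flatMap_cons, hcq]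
      rw [List.cons_append] at ih
      injection ih with h1 h2
      rw [List.cons_append, h1, h2]

-- strip helpers -------------------------------------------------------------

theorem ofList_ne_empty {l : List Char} (h : l ≠ []) : String.ofList l ≠ "" := by
  intro he
  apply h
  have := congrArg String.toList he
  simpa using this

theorem dropWhile_of_head {p : Char → Bool} {l : List Char}
    (h : ∀ a ∈ l.head?, p a = false) : l.dropWhile p = l := by
  cases l with
  | nil => rfl
  | cons a t => simp [h a (by simp)]

theorem rstrip_all_space {z : List Char}
    (h : ∀ x ∈ z, PySem.Chars.isspace x = true) : PySem.Chars.rstrip z = [] := by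
  unfold PySem.Chars.rstrip
  have : z.reverse.dropWhile PySem.Chars.isspace = [] := by
    rw [List.dropWhile_eq_nil_iff]
    intro x hx
    exact h x (by simpa using hx)
  rw [this]; rfl

theorem rstrip_append {cur z : List Char}
    (h : ∀ a ∈ cur.getLast?, PySem.Chars.isspace a = false) :
    PySem.Chars.rstrip (cur ++ z) = cur ++ PySem.Chars.rstrip z := by
  unfold PySem.Chars.rstrip
  rw [List.reverse_append, List.dropWhile_append]
  have hcur : cur.reverse.dropWhile PySem.Chars.isspace = cur.reverse :=
    dropWhile_of_head (by intro a ha; rw [List.head?_reverse] at ha; exact h a ha)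
  by_cases hz : (z.reverse.dropWhile PySem.Chars.isspace).isEmpty = true
  · rw [if_pos hz, hcur]
    rw [List.isEmpty_iff] at hz
    simp [hz]
  · rw [if_neg hz]
    simp

theorem strip_token {cur pend : List Char} (hinv : InvCP cur pend) (z : List Char) :
    PySem.Chars.strip (cur ++ (pend ++ z))
      = if cur = [] then PySem.Chars.strip z else cur ++ PySem.Chars.rstrip (pend ++ z) := by
  obtain ⟨hpend, hemp, hhead, hlast⟩ := hinv
  by_cases hc : cur = []
  · subst hc
    rw [hemp rfl]
    simp
  · rw [if_neg hc]
    unfold PySem.Chars.strip PySem.Chars.lstrip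
    rw [dropWhile_of_head (p := PySem.Chars.isspace) (l := cur ++ (pend ++ z)) (by
      intro a ha
      cases cur with
      | nil => exact absurd rfl hc
      | cons b t =>
        simp at ha
        subst ha
        exact hhead b (by simp))]
    exact rstrip_append hlast

theorem flush_eq {cur pend : List Char} (hinv : InvCP cur pend) :
    (if cur ≠ [] then [String.ofList cur] else []) = stripFilter [cur ++ pend] := by
  have hz : cur ++ pend = cur ++ (pend ++ []) := by simp
  have hstrip := strip_token hinv []
  rw [← hz] at hstrip
  unfold stripFilter
  simp only [List.map_cons, List.map_nil, List.filter]
  rw [PySem.Str.strip, (by simp : (String.ofList (cur ++ pend)).toList = cur ++ pend), hstrip]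
  by_cases hc : cur = []
  · subst hc
    simp [PySem.Chars.strip, PySem.Chars.lstrip, PySem.Chars.rstrip]
  · rw [if_neg hc, if_pos hc, rstrip_all_space (by simpa using hinv.1)]
    simp [ofList_ne_empty hc]

theorem stripFilter_cons (t : List Char) (ts : List (List Char)) :
    stripFilter (t :: ts) = stripFilter [t] ++ stripFilter ts := by
  unfold stripFilter
  simp only [List.map_cons, List.map_nil, List.filter]
  split <;> simp

theorem strip_cons_space {c : Char} (hc : PySem.Chars.isspace c = true) (t : List Char) :
    PySem.Chars.strip (c :: t) = PySem.Chars.strip t := by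
  unfold PySem.Chars.strip PySem.Chars.lstrip
  rw [List.dropWhile_cons, if_pos hc]

-- the main scanner lemma
theorem scanB_eq (l cur pend : List Char) (out : List String) (hinv : InvCP cur pend) :
    scanB l cur pend out
      = out ++ stripFilter ((tok l).modifyHead (fun t => cur ++ (pend ++ t))) := by
  induction l, cur, pend, out using scanB.induct with
  | case1 cur pend out =>
    rw [scanB, tok]
    simp only [List.modifyHead]
    rw [flush_eq hinv]
    simp
  | case2 c rest cur pend out hcond ih =>
    have hcond' : c = '\n' ∨ sep5.isPrefixOf (c :: rest) = true := hcond
    have ih' := ih ⟨by simp, fun _ => rfl, by simp, by simp⟩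
    simp only [dite_eq_ite] at ih'
    obtain ⟨t0, ts, htok⟩ : ∃ t0 ts,
        tok (if c = '\n' then rest else rest.drop 4) = t0 :: ts := by
      cases h : tok (if c = '\n' then rest else rest.drop 4) with
      | nil => exact absurd h (tok_ne_nil _)
      | cons a l => exact ⟨a, l, rfl⟩
    rw [htok] at ih'
    simp only [List.modifyHead, List.nil_append] at ih'
    rw [scanB, if_pos hcond, tok, if_pos hcond', htok]
    rw [ih']
    simp only [List.modifyHead, List.append_nil]
    rw [stripFilter_cons (cur ++ pend), ← flush_eq hinv]
    simp
  | case3 c rest cur pend out hcond hspace ih =>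
    have hcond' : ¬ (c = '\n' ∨ sep5.isPrefixOf (c :: rest) = true) := hcond
    simp only [dite_eq_ite] at ih
    obtain ⟨t0, ts, htok⟩ : ∃ t0 ts, tok rest = t0 :: ts := by
      cases h : tok rest with
      | nil => exact absurd h (tok_ne_nil rest)
      | cons a l => exact ⟨a, l, rfl⟩
    obtain ⟨hpend, hemp, hhead, hlast⟩ := hinv
    rw [scanB, if_neg hcond, if_pos hspace, tok, if_neg hcond', htok]
    by_cases hc : cur = []
    · subst hc
      have hp := hemp rfl
      subst hp
      rw [if_neg (fun h => h rfl)] at ih ⊢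
      have ih' := ih ⟨by simp, fun _ => rfl, by simp, by simp⟩
      rw [htok] at ih'
      simp only [List.modifyHead, List.nil_append] at ih'
      rw [ih']
      simp only [List.modifyHead, List.nil_append]
      have hst : stripFilter [c :: t0] = stripFilter [t0] := by
        unfold stripFilter
        simp only [List.map_cons, List.map_nil]
        rw [PySem.Str.strip, PySem.Str.strip,
          (by simp : (String.ofList (c :: t0)).toList = c :: t0),
          (by simp : (String.ofList t0).toList = t0),
          strip_cons_space hspace]
      rw [stripFilter_cons t0 ts, stripFilter_cons (c :: t0) ts, hst]
    · rw [if_pos hc] at ih ⊢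
      have hinv' : InvCP cur (pend ++ [c]) := by
        refine ⟨?_, fun h => absurd h hc, hhead, hlast⟩
        intro x hx
        rcases List.mem_append.mp hx with h | h
        · exact hpend x h
        · simp at h; subst h; exact hspace
      have ih' := ih hinv'
      rw [htok] at ih'
      simp only [List.modifyHead] at ih'
      rw [ih']
      simp only [List.modifyHead]
      have hl : cur ++ ((pend ++ [c]) ++ t0) = cur ++ (pend ++ (c :: t0)) := by simp
      rw [hl]
  | case4 c rest cur pend out hcond hspace ih =>
    have hcond' : ¬ (c = '\n' ∨ sep5.isPrefixOf (c :: rest) = true) := hcond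
    obtain ⟨t0, ts, htok⟩ : ∃ t0 ts, tok rest = t0 :: ts := by
      cases h : tok rest with
      | nil => exact absurd h (tok_ne_nil rest)
      | cons a l => exact ⟨a, l, rfl⟩
    obtain ⟨hpend, hemp, hhead, hlast⟩ := hinv
    rw [scanB, if_neg hcond, if_neg hspace, tok, if_neg hcond', htok]
    have hinv' : InvCP (cur ++ (pend ++ [c])) [] := by
      refine ⟨by simp, by simp, ?_, ?_⟩
      · intro a ha
        cases cur with
        | nil =>
          rw [hemp rfl] at ha
          simp at ha
          subst ha
          simpa using hspace
        | cons b t =>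
          simp at ha
          subst ha
          exact hhead b (by simp)
      · intro a ha
        rw [(by simp : cur ++ (pend ++ [c]) = (cur ++ pend) ++ [c]),
          List.getLast?_concat] at ha
        simp at ha
        subst ha
        simpa using hspace
    have ih' := ih hinv'
    rw [htok] at ih'
    simp only [List.modifyHead, List.nil_append] at ih'
    rw [ih']
    simp only [List.modifyHead]
    have hl : (cur ++ (pend ++ [c])) ++ t0 = cur ++ (pend ++ (c :: t0)) := by simp
    rw [hl]

-- the inner Python loop over parts (appending stripped nonempty parts) as map + filter
theorem inner_foldl_eq (parts : List (List Char)) (acc : List String) :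
    (parts.map String.ofList).foldl (fun acc part =>
      let cleaned_part := PySem.Str.strip part
      if cleaned_part ≠ "" then acc ++ [cleaned_part] else acc) acc
    = acc ++ ((parts.map (fun l => PySem.Str.strip (String.ofList l))).filter (fun s => s ≠ "")) := by
  induction parts generalizing acc with
  | nil => simp
  | cons p ps ih =>
    simp only [List.map_cons, List.foldl_cons, List.filter_cons]
    rw [ih]
    by_cases h : PySem.Str.strip (String.ofList p) ≠ ""
    · rw [if_pos h]
      simp [h]
    · rw [if_neg h]
      simp at h
      simp [h]

-- the outer Python loop over lines, flattened
theorem outer_foldl_eq (linesC : List (List Char)) (acc : List String) :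
    (linesC.map String.ofList).foldl (fun cleaned_lines line =>
      let parts := (PySem.Chars.splitOn line.toList sep5).map String.ofList
      parts.foldl (fun acc part =>
        let cleaned_part := PySem.Str.strip part
        if cleaned_part ≠ "" then acc ++ [cleaned_part] else acc) cleaned_lines) acc
    = acc ++ (((linesC.flatMap (fun l => PySem.Chars.splitOn l sep5)).map
        (fun l => PySem.Str.strip (String.ofList l))).filter (fun s => s ≠ "")) := by
  induction linesC generalizing acc with
  | nil => simp
  | cons l ls ih =>
    simp only [List.map_cons, List.foldl_cons, List.flatMap_cons]
    rw [inner_foldl_eq, ih]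
    simp

-- ===== VERDICT (by name: the statement is the Claim_ definition above) =====
theorem clean_zitat_spec : Claim_equal_clean_zitat := by
  intro zitat _
  unfold Spec_clean_zitat clean_zitat clean_zitat_alt
  simp only []
  rw [show (['[', '.', '.', '.', ']'] : List Char) = sep5 from rfl]
  rw [outer_foldl_eq]
  rw [scanB_eq zitat.toList [] [] [] ⟨by simp, fun _ => rfl, by simp, by simp⟩]
  simp only [List.nil_append]
  rw [modifyHead_idfun, tok_eq]
  rw [splitOn_eq_splitRec ['\n'] zitat.toList (by simp), splitRec_newline]
  unfold stripFilter
  have hfun : (fun l => PySem.Chars.splitOn l sep5) = splitRec sep5 := by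
    funext a
    exact splitOn_eq_splitRec _ _ (by simp [sep5])
  rw [hfun]
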